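-- pv_equiv track=rewrite | github.com/JohnStokes228/home_scraping_project | HousingPriceScraper/HousingPriceScraper/functions/data_management.py | expand_list_variable
-- ===== SOURCE A (Python) =====
-- import itertools
--
-- def expand_list_variable(data_dict, list_variable, delete_old_var=True):
--     """
--     function will expand a list of lists into separate lists of length 1 each within the data_dict
--
--     :param data_dict: dictionary of data, including one key equal to list_variable
--     :param list_variable: the variable name of the list variable
--     :param delete_old_var: if True, will delete list_variable after use
--     :return: data_dict but with the final key blown up into many, and the original variable deleted
--     """
--     list_of_lists = list(zip(*itertools.zip_longest(*[i.split(',') for i in data_dict[list_variable]],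
--                                                     fillvalue='')))
--     new_col_names = ['{}_{}'.format(list_variable[:-1], i) for i in range(len(list_of_lists[0]))]
--     for new_col_ind in range(len(new_col_names)):
--         data_dict[new_col_names[new_col_ind]] = [i[new_col_ind] for i in list_of_lists]
--     if delete_old_var:
--         del data_dict[list_variable]
--     return data_dict
-- ===== SOURCE B (Python) =====
-- def expand_list_variable(data_dict, list_variable, delete_old_var=True):
--     """Single streaming pass over the rows: grow the column lists on the fly,
--     padding new columns with the rows already seen; no max-length pass, no
--     zip/transpose stage."""
--     cols = []   # cols[j] accumulates output column j, padded as we go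
--     seen = 0
--     for s in data_dict[list_variable]:
--         parts = s.split(',')
--         while len(cols) < len(parts):
--             cols.append([''] * seen)          # open a new column, back-filled
--         for j, col in enumerate(cols):
--             col.append(parts[j] if j < len(parts) else '')
--         seen += 1
--     base = list_variable[:-1]
--     for j, col in enumerate(cols):
--         data_dict['{}_{}'.format(base, j)] = col
--     if delete_old_var:
--         del data_dict[list_variable]
--     return data_dict
-- ===== Notes on version B (the rewrite author's own statement) =====
-- stated objective: alternative
-- what changed: B streams the rows once, growing the list of output columns on the fly (a new column is back-filled with '' for rows already seen, short rows append '' to existing columns), instead of A's staged zip_longest pad plus double transpose followed by per-column extraction.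
import Mathlib
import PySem

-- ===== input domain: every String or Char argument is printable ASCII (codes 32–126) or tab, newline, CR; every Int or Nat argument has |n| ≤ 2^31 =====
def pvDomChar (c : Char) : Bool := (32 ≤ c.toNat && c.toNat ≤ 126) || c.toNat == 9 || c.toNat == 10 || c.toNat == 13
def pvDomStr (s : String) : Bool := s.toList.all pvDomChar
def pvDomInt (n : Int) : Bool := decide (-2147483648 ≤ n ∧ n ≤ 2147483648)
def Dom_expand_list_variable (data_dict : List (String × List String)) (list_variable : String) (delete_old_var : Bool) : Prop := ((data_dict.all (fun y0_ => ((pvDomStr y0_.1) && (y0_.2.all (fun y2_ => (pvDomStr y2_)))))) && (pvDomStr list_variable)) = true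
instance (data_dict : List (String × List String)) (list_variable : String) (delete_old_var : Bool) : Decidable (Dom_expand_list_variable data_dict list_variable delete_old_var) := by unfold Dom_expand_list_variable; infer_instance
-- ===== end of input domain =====

-- B replaces A's zip_longest + double transpose by a single streaming pass that grows the
-- padded output columns row by row (objective: alternative). A mutates data_dict in place;
-- the equivalence proved is about the returned dict's contents (B performs the same mutation).

-- ===== PORT A =====
-- itertools.zip_longest(*xss, fillvalue=fill): max-length transpose, padding with fill
def pvZipLongestT (xss : List (List String)) (fill : String) : List (List String) :=
  let m := xss.foldl (fun a r => max a r.length) 0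
  (List.range m).map (fun k => xss.map (fun r => r.getD k fill))

-- zip(*xss): min-length transpose (zip() with no arguments is empty)
def pvZipT (xss : List (List String)) : List (List String) :=
  match xss with
  | [] => []
  | x :: rest =>
    let n := rest.foldl (fun a r => min a r.length) x.length
    (List.range n).map (fun k => (x :: rest).map (fun r => r.getD k ""))

def expand_list_variable (data_dict : List (String × List String)) (list_variable : String) (delete_old_var : Bool) : List (String × List String) :=
  let d := PySem.Dict.mk data_dict
  -- [i.split(',') for i in data_dict[list_variable]]  (getD []: KeyError is outside Pre_)
  let rows := (d.getD list_variable []).map (fun s => (PySem.Str.split? s ",").getD [])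
  let list_of_lists := pvZipT (pvZipLongestT rows "")
  -- len(list_of_lists[0])  (headD: IndexError on empty is outside Pre_)
  let ncols := (list_of_lists.headD []).length
  let new_col_names := (List.range ncols).map
    (fun i => PySem.Str.slice list_variable none (some (-1)) ++ "_" ++ PySem.Int.toStr (Int.ofNat i))
  let d1 := (List.range ncols).foldl
    (fun acc j => acc.insert (new_col_names.getD j "")
      (list_of_lists.map (fun r => r.getD j ""))) d
  (if delete_old_var then d1.erase list_variable else d1).items

-- ===== PORT B =====
-- one row of B's loop body: the while-append of back-filled new columns, then the
-- enumerate loop appending this row's (bounds-checked) entry to every column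
def pvStep (st : List (List String) × Nat) (parts : List String) : List (List String) × Nat :=
  let cols := st.1 ++ List.replicate (parts.length - st.1.length) (List.replicate st.2 "")
  (cols.mapIdx (fun j col => col ++ [if j < parts.length then parts.getD j "" else ""]), st.2 + 1)

def expand_list_variable_alt (data_dict : List (String × List String)) (list_variable : String) (delete_old_var : Bool) : List (String × List String) :=
  let d := PySem.Dict.mk data_dict
  let st := (d.getD list_variable []).foldl
    (fun st s => pvStep st ((PySem.Str.split? s ",").getD [])) ([], 0)
  let base := PySem.Str.slice list_variable none (some (-1))
  let d1 := st.1.zipIdx.foldl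
    (fun acc p => acc.insert (base ++ "_" ++ PySem.Int.toStr (Int.ofNat p.2)) p.1) d
  (if delete_old_var then d1.erase list_variable else d1).items

-- ===== PRECONDITION & SPEC =====
-- Pre_ excludes exactly the inputs where A raises: a missing key (KeyError, B raises too)
-- or an empty list under the key (IndexError at list_of_lists[0]; B raises KeyError on the former and returns on the latter).
def Pre_expand_list_variable (data_dict : List (String × List String)) (list_variable : String) (delete_old_var : Bool) : Prop :=
  (PySem.Dict.mk data_dict).getD list_variable [] ≠ []
instance (data_dict : List (String × List String)) (list_variable : String) (delete_old_var : Bool) : Decidable (Pre_expand_list_variable data_dict list_variable delete_old_var) := by unfold Pre_expand_list_variable; infer_instance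

def pvWitness_expand_list_variable : (List (String × List String)) × String × Bool :=
  ([("ids", ["a,b", "c"]), ("x", ["1"])], "ids", true)

def Spec_expand_list_variable (data_dict : List (String × List String)) (list_variable : String) (delete_old_var : Bool) (out : List (String × List String)) : Prop := out = expand_list_variable_alt data_dict list_variable delete_old_var
instance (data_dict : List (String × List String)) (list_variable : String) (delete_old_var : Bool) (out : List (String × List String)) : Decidable (Spec_expand_list_variable data_dict list_variable delete_old_var out) := by unfold Spec_expand_list_variable; infer_instance

-- ===== CLAIM (what is proved, stated in full; the proofs are below) =====
def Claim_equal_expand_list_variable : Prop := ∀ (data_dict : List (String × List String)) (list_variable : String) (delete_old_var : Bool), Dom_expand_list_variable data_dict list_variable delete_old_var → Pre_expand_list_variable data_dict list_variable delete_old_var → Spec_expand_list_variable data_dict list_variable delete_old_var (expand_list_variable data_dict list_variable delete_old_var)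

-- ===== LEMMAS AND PROOFS =====

-- canonical description of the padded columns, used to meet both ports in the middle
def pvPad (j : Nat) (r : List String) : String := if j < r.length then r.getD j "" else ""
def pvMaxLen (rows : List (List String)) : Nat := rows.foldl (fun a r => max a r.length) 0
def pvCols (rows : List (List String)) : List (List String) :=
  (List.range (pvMaxLen rows)).map (fun j => rows.map (pvPad j))

theorem pv_foldl_min_const (l : List (List String)) (n : Nat)
    (h : ∀ r ∈ l, r.length = n) :
    l.foldl (fun a r => min a r.length) n = n := by
  induction l with
  | nil => rfl
  | cons x xs ih =>
    have hx : x.length = n := h x (by simp)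
    simp only [List.foldl_cons, hx, min_self]
    exact ih (fun r hr => h r (by simp [hr]))

theorem pv_zipT_const_len (xss : List (List String)) (n : Nat)
    (hne : xss ≠ []) (h : ∀ r ∈ xss, r.length = n) :
    pvZipT xss = (List.range n).map (fun k => xss.map (fun r => r.getD k "")) := by
  match xss, hne with
  | x :: rest, _ =>
    have hx : x.length = n := h x (by simp)
    have hmin : rest.foldl (fun a r => min a r.length) x.length = n := by
      rw [hx]; exact pv_foldl_min_const rest n (fun r hr => h r (by simp [hr]))
    simp only [pvZipT, hmin]

theorem pv_len_zl (rows : List (List String)) (fill : String) (t : List String)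
    (ht : t ∈ pvZipLongestT rows fill) : t.length = rows.length := by
  simp only [pvZipLongestT, List.mem_map] at ht
  obtain ⟨k, -, rfl⟩ := ht
  simp

theorem pv_col_eq (rows : List (List String)) (j : Nat)
    (hj : j < pvMaxLen rows) :
    ((List.range rows.length).map
        (fun k => (pvZipLongestT rows "").map (fun t => t.getD k ""))).map
        (fun r => r.getD j "")
      = rows.map (pvPad j) := by
  apply List.ext_getElem
  · simp
  · intro i h1 h2
    simp only [List.getElem_map, List.getElem_range, pvZipLongestT]
    have hlen : i < rows.length := by simpa using h2
    have hjlen : j < ((List.range (rows.foldl (fun a r => max a r.length) 0)).map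
        (fun k => rows.map (fun r => r.getD k ""))).length := by
      simpa [pvMaxLen] using hj
    rw [List.getD_eq_getElem _ _ (by simpa using hjlen)]
    simp only [List.getElem_map, List.getElem_range]
    rw [List.getD_eq_getElem?_getD, List.getElem?_map]
    have : rows[i]? = some rows[i] := List.getElem?_eq_getElem hlen
    rw [this]
    simp only [Option.map_some, Option.getD_some, pvPad]
    by_cases hb : j < rows[i].length
    · rw [List.getD_eq_getElem _ _ hb, if_pos hb]
    · rw [if_neg hb, List.getD_eq_default _ _ (Nat.le_of_not_lt hb)]

-- A's core (transpose, names, per-column extraction fold) equals the canonical fold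
theorem pv_a_core_eq (rows : List (List String)) (hr : rows ≠ [])
    (d : PySem.Dict String (List String)) (base : String) :
    (let list_of_lists := pvZipT (pvZipLongestT rows "")
     let ncols := (list_of_lists.headD []).length
     let new_col_names := (List.range ncols).map
       (fun i => base ++ "_" ++ PySem.Int.toStr (Int.ofNat i))
     (List.range ncols).foldl
       (fun acc j => acc.insert (new_col_names.getD j "")
         (list_of_lists.map (fun r => r.getD j ""))) d)
    = (List.range (pvMaxLen rows)).foldl
        (fun acc j => acc.insert (base ++ "_" ++ PySem.Int.toStr (Int.ofNat j))
          (rows.map (pvPad j))) d := by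
  set m := pvMaxLen rows with hmdef
  have hn : rows.length ≠ 0 := by
    intro h0; exact hr (List.eq_nil_of_length_eq_zero h0)
  by_cases hm0 : m = 0
  · have hzl : pvZipLongestT rows "" = [] := by
      simp only [pvZipLongestT, pvMaxLen] at hmdef ⊢
      simp only [← hmdef, hm0, List.range_zero, List.map_nil]
    simp only [hzl, hm0]
    simp [pvZipT]
  · have hzlne : pvZipLongestT rows "" ≠ [] := by
      simp only [pvZipLongestT, pvMaxLen] at hmdef ⊢
      simp only [← hmdef, ne_eq, List.map_eq_nil_iff, List.range_eq_nil]
      exact hm0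
    have hlol : pvZipT (pvZipLongestT rows "")
        = (List.range rows.length).map
            (fun k => (pvZipLongestT rows "").map (fun t => t.getD k "")) :=
      pv_zipT_const_len _ rows.length hzlne (pv_len_zl rows "")
    have hncols : ((pvZipT (pvZipLongestT rows "")).headD []).length = m := by
      rw [hlol]
      obtain ⟨n', hn'⟩ : ∃ n', rows.length = n' + 1 :=
        ⟨rows.length - 1, (Nat.succ_pred_eq_of_pos (Nat.pos_of_ne_zero hn)).symm⟩
      rw [hn', List.range_succ_eq_map]
      simp only [List.map_cons, List.headD_cons, List.length_map]
      simp [pvZipLongestT, pvMaxLen] at hmdef ⊢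
      omega
    simp only [hncols]
    apply PySem.List.foldl_congr_mem
    intro acc j hjmem
    have hj : j < m := List.mem_range.mp hjmem
    have hname : ((List.range m).map
        (fun i => base ++ "_" ++ PySem.Int.toStr (Int.ofNat i))).getD j ""
        = base ++ "_" ++ PySem.Int.toStr (Int.ofNat j) := by
      have hjlt : j < ((List.range m).map
          (fun i => base ++ "_" ++ PySem.Int.toStr (Int.ofNat i))).length := by simpa using hj
      rw [List.getD_eq_getElem _ _ hjlt, List.getElem_map, List.getElem_range]
    rw [hname, hlol, pv_col_eq rows j hj]

-- every row is at most pvMaxLen long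
theorem pv_len_le_maxLen (rows : List (List String)) (r : List String) (hr : r ∈ rows) :
    r.length ≤ pvMaxLen rows :=
  (PySem.List.le_foldl_max_nat rows List.length 0).2 r hr

theorem pv_maxLen_append (rows : List (List String)) (p : List String) :
    pvMaxLen (rows ++ [p]) = max (pvMaxLen rows) p.length := by
  simp [pvMaxLen, List.foldl_append]

-- B's streaming step sends the canonical state for `rows` to the one for `rows ++ [p]`
theorem pv_step_canon (rows : List (List String)) (p : List String) :
    pvStep (pvCols rows, rows.length) p = (pvCols (rows ++ [p]), rows.length + 1) := by
  unfold pvStep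
  refine Prod.ext ?_ rfl
  have hlen : (pvCols rows).length = pvMaxLen rows := by simp [pvCols]
  apply List.ext_getElem
  · simp [pvCols, pv_maxLen_append]; omega
  · intro j h1 h2
    have hj : j < max (pvMaxLen rows) p.length := by
      simpa [pvCols, pv_maxLen_append] using h2
    rw [List.getElem_mapIdx]
    simp only [pvCols, pv_maxLen_append, List.getElem_map, List.getElem_range,
      List.map_append, List.map_cons, List.map_nil]
    by_cases hjm : j < pvMaxLen rows
    · rw [List.getElem_append_left (by simpa [hlen] using hjm)]
      simp [pvPad]
    · rw [List.getElem_append_right (by simpa [hlen] using hjm)]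
      rw [List.getElem_replicate]
      have hmap : rows.map (pvPad j) = List.replicate rows.length "" := by
        rw [List.eq_replicate_iff]
        refine ⟨by simp, ?_⟩
        intro b hb
        obtain ⟨r, hr, rfl⟩ := List.mem_map.mp hb
        have : r.length ≤ j := le_trans (pv_len_le_maxLen rows r hr) (Nat.le_of_not_lt hjm)
        simp [pvPad, Nat.not_lt.mpr this]
      rw [hmap]
      rfl

-- B's fold over the rows produces exactly the canonical padded columns
theorem pv_fold_canon (rows : List (List String)) :
    rows.foldl pvStep ([], 0) = (pvCols rows, rows.length) := by
  induction rows using List.reverseRecOn with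
  | nil => simp [pvCols, pvMaxLen]
  | append_singleton rows p ih =>
    rw [List.foldl_append, List.foldl_cons, List.foldl_nil, ih, pv_step_canon]
    simp

-- B's zipIdx dict fold over the canonical columns equals the canonical range fold
theorem pv_b_dict_eq (rows : List (List String))
    (d : PySem.Dict String (List String)) (base : String) :
    (pvCols rows).zipIdx.foldl
      (fun acc p => acc.insert (base ++ "_" ++ PySem.Int.toStr (Int.ofNat p.2)) p.1) d
    = (List.range (pvMaxLen rows)).foldl
        (fun acc j => acc.insert (base ++ "_" ++ PySem.Int.toStr (Int.ofNat j))
          (rows.map (pvPad j))) d := by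
  have hz : (pvCols rows).zipIdx
      = (List.range (pvMaxLen rows)).map (fun j => (rows.map (pvPad j), j)) := by
    apply List.ext_getElem
    · simp [pvCols]
    · intro i h1 h2
      simp [pvCols, List.getElem_zipIdx]
  rw [hz, List.foldl_map]

theorem expand_list_variable_spec : Claim_equal_expand_list_variable := by
  intro data_dict list_variable delete_old_var _hdom hpre
  unfold Spec_expand_list_variable expand_list_variable expand_list_variable_alt
  have hrows : ((PySem.Dict.mk data_dict).getD list_variable []).map
      (fun s => (PySem.Str.split? s ",").getD []) ≠ [] := by
    simp only [ne_eq, List.map_eq_nil_iff]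
    exact hpre
  set rows := ((PySem.Dict.mk data_dict).getD list_variable []).map
      (fun s => (PySem.Str.split? s ",").getD []) with hrowsdef
  simp only
  rw [← List.foldl_map, pv_fold_canon rows, pv_b_dict_eq rows,
    pv_a_core_eq rows hrows]
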